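-- pv_equiv track=rewrite | github.com/okfde/fragdenstaat_de | fragdenstaat_de/theme/management/commands/update_georegion.py | get_higher_ars
-- ===== SOURCE A (Python) =====
-- def get_higher_ars(ars):
--     if not ars.rstrip("0"):
--         return ""
--     while True:
--         if len(ars) == 2:
--             return ""
--         elif len(ars) == 3:
--             return ars[:2]
--         elif len(ars) == 5:
--             return ars[:3]
--         elif len(ars) == 9:
--             return ars[:5]
--         elif len(ars) == 12:
--             return ars[:9]
--         if ars[-1] == "0":
--             ars = ars[:-1]
--             continue
--         break
--     return ""
-- ===== SOURCE B (Python) =====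
-- def get_higher_ars(ars):
--     if all(c == "0" for c in ars):
--         return ""
--     n = len(ars)
--     for L, p in [(12, 9), (9, 5), (5, 3), (3, 2), (2, 0)]:
--         if n >= L:
--             return ars[:p] if ars[L:] == "0" * (n - L) else ""
--     return ""
-- ===== Notes on version B (the rewrite author's own statement) =====
-- stated objective: simpler
-- what changed: Replaces A's char-at-a-time trailing-zero stripping loop with a direct scan of a descending (special-length, prefix-cut) table: pick the largest special length <= len(ars), check the suffix beyond it is all zeros, and slice the prefix.
import Mathlib
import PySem

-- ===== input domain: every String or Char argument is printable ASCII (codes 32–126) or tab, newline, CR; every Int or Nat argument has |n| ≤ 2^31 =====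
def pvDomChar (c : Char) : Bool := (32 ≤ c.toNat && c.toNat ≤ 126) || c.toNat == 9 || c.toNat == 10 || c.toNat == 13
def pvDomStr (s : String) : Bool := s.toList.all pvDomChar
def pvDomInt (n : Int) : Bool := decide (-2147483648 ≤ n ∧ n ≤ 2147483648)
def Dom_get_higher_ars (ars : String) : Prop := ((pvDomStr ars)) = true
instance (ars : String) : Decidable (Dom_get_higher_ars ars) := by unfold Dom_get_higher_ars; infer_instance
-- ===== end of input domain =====

-- B replaces A's one-char-at-a-time trailing-zero stripping loop with a direct scan of a
-- descending (special-length, prefix-cut) table plus one all-zeros suffix check; objective: simpler.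

-- ===== PORT A =====
-- hand port of ars.rstrip("0") (exact: drops trailing '0' characters)
def pvRstrip0 (cs : List Char) : List Char := (cs.reverse.dropWhile (· == '0')).reverse

-- the `while True` loop of A, step for step
def pvLoopA (cs : List Char) : String :=
  if cs.length = 2 then ""
  else if cs.length = 3 then String.ofList (PySem.List.slice cs none (some 2))
  else if cs.length = 5 then String.ofList (PySem.List.slice cs none (some 3))
  else if cs.length = 9 then String.ofList (PySem.List.slice cs none (some 5))
  else if cs.length = 12 then String.ofList (PySem.List.slice cs none (some 9))
  else
    match h : PySem.List.pyGet? cs (-1) with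
    | some c => if c = '0' then pvLoopA (PySem.List.slice cs none (some (-1))) else ""
    | none => ""
termination_by cs.length
decreasing_by
  have hne : cs ≠ [] := by intro hnil; subst hnil; simp [PySem.List.pyGet?] at h
  have hpos : 0 < cs.length := List.length_pos_iff.mpr hne
  simp [PySem.List.slice_to_neg_one]
  omega

def get_higher_ars (ars : String) : String :=
  if pvRstrip0 ars.toList = [] then "" else pvLoopA ars.toList

-- ===== PORT B =====
def pvTable : List (Nat × Nat) := [(12, 9), (9, 5), (5, 3), (3, 2), (2, 0)]

-- the `for L, p in …` loop of B
def pvScan (cs : List Char) : List (Nat × Nat) → String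
  | [] => ""
  | (L, p) :: rest =>
    if L ≤ cs.length then
      if cs.drop L = List.replicate (cs.length - L) '0' then String.ofList (cs.take p) else ""
    else pvScan cs rest

def get_higher_ars_alt (ars : String) : String :=
  if ars.toList.all (· == '0') then "" else pvScan ars.toList pvTable

-- ===== PRECONDITION & SPEC =====
def Spec_get_higher_ars (ars : String) (out : String) : Prop := out = get_higher_ars_alt ars
instance (ars : String) (out : String) : Decidable (Spec_get_higher_ars ars out) := by unfold Spec_get_higher_ars; infer_instance

-- ===== CLAIM (what is proved, stated in full; the proofs are below) =====
def Claim_equal_get_higher_ars : Prop := ∀ (ars : String), Dom_get_higher_ars ars → Spec_get_higher_ars ars (get_higher_ars ars)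

-- ===== LEMMAS AND PROOFS =====

theorem pvRstrip0_eq_nil_iff (cs : List Char) : pvRstrip0 cs = [] ↔ ∀ c ∈ cs, c = '0' := by
  simp [pvRstrip0, List.dropWhile_eq_nil_iff]

-- the all-zeros suffix test rephrased as a membership condition
theorem drop_eq_replicate_iff (cs : List Char) (L : Nat) (_hL : L ≤ cs.length) :
    cs.drop L = List.replicate (cs.length - L) '0' ↔ ∀ c ∈ cs.drop L, c = '0' := by
  rw [List.eq_replicate_iff]
  simp

-- one table entry, ignoring a trailing '0'
theorem pvEntry_dropLast (u : List Char) (L p : Nat) (hL : L ≤ u.length) (hp : p ≤ u.length) :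
    (if (u ++ ['0']).drop L = List.replicate (u.length + 1 - L) '0'
        then String.ofList ((u ++ ['0']).take p) else "")
      = (if u.drop L = List.replicate (u.length - L) '0' then String.ofList (u.take p) else "") := by
  have h1 : ((u ++ ['0']).drop L = List.replicate (u.length + 1 - L) '0') ↔
      (∀ c ∈ (u ++ ['0']).drop L, c = '0') := by
    have := drop_eq_replicate_iff (u ++ ['0']) L (by simp; omega)
    simpa using this
  have h2 := drop_eq_replicate_iff u L hL
  have hmem : (∀ c ∈ (u ++ ['0']).drop L, c = '0') ↔ (∀ c ∈ u.drop L, c = '0') := by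
    rw [List.drop_append_of_le_length hL]
    simp only [List.mem_append, List.mem_singleton]
    constructor
    · intro hA x hx; exact hA x (Or.inl hx)
    · rintro hA x (hx | rfl)
      · exact hA x hx
      · rfl
  simp only [h1, h2, hmem]
  split_ifs with h
  · rw [List.take_append_of_le_length hp]
  · rfl

-- when the last char is '0' and the length is not a table length, pvScan ignores the last char
theorem pvScan_dropLast (u : List Char)
    (hsp : u.length + 1 ≠ 2 ∧ u.length + 1 ≠ 3 ∧ u.length + 1 ≠ 5 ∧ u.length + 1 ≠ 9 ∧ u.length + 1 ≠ 12) :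
    pvScan (u ++ ['0']) pvTable = pvScan u pvTable := by
  obtain ⟨h2, h3, h5, h9, h12⟩ := hsp
  simp only [pvScan, pvTable, List.length_append, List.length_cons, List.length_nil, Nat.zero_add]
  by_cases c12 : 12 ≤ u.length
  · rw [if_pos (by omega), if_pos c12]; exact pvEntry_dropLast u 12 9 c12 (by omega)
  · rw [if_neg (by omega), if_neg c12]
    by_cases c9 : 9 ≤ u.length
    · rw [if_pos (by omega), if_pos c9]; exact pvEntry_dropLast u 9 5 c9 (by omega)
    · rw [if_neg (by omega), if_neg c9]
      by_cases c5 : 5 ≤ u.length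
      · rw [if_pos (by omega), if_pos c5]; exact pvEntry_dropLast u 5 3 c5 (by omega)
      · rw [if_neg (by omega), if_neg c5]
        by_cases c3 : 3 ≤ u.length
        · rw [if_pos (by omega), if_pos c3]; exact pvEntry_dropLast u 3 2 c3 (by omega)
        · rw [if_neg (by omega), if_neg c3]
          by_cases c2 : 2 ≤ u.length
          · rw [if_pos (by omega), if_pos c2]; exact pvEntry_dropLast u 2 0 c2 (by omega)
          · rw [if_neg (by omega), if_neg c2]

-- when the last char is not '0', a reachable suffix check fails
theorem pvEntry_last_ne (u : List Char) (c : Char) (hc : c ≠ '0') (L p : Nat) (hL : L ≤ u.length) :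
    (if (u ++ [c]).drop L = List.replicate (u.length + 1 - L) '0'
        then String.ofList ((u ++ [c]).take p) else "") = "" := by
  have h1 : ((u ++ [c]).drop L = List.replicate (u.length + 1 - L) '0') ↔
      (∀ x ∈ (u ++ [c]).drop L, x = '0') := by
    have := drop_eq_replicate_iff (u ++ [c]) L (by simp; omega)
    simpa using this
  simp only [h1]
  rw [if_neg]
  intro hall
  exact hc (hall c (by rw [List.drop_append_of_le_length hL]; simp))

theorem pvScan_last_ne (u : List Char) (c : Char) (hc : c ≠ '0')
    (hsp : u.length + 1 ≠ 2 ∧ u.length + 1 ≠ 3 ∧ u.length + 1 ≠ 5 ∧ u.length + 1 ≠ 9 ∧ u.length + 1 ≠ 12) :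
    pvScan (u ++ [c]) pvTable = "" := by
  obtain ⟨h2, h3, h5, h9, h12⟩ := hsp
  simp only [pvScan, pvTable, List.length_append, List.length_cons, List.length_nil, Nat.zero_add]
  by_cases c12 : 12 ≤ u.length
  · rw [if_pos (by omega)]; exact pvEntry_last_ne u c hc 12 9 c12
  · rw [if_neg (by omega)]
    by_cases c9 : 9 ≤ u.length
    · rw [if_pos (by omega)]; exact pvEntry_last_ne u c hc 9 5 c9
    · rw [if_neg (by omega)]
      by_cases c5 : 5 ≤ u.length
      · rw [if_pos (by omega)]; exact pvEntry_last_ne u c hc 5 3 c5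
      · rw [if_neg (by omega)]
        by_cases c3 : 3 ≤ u.length
        · rw [if_pos (by omega)]; exact pvEntry_last_ne u c hc 3 2 c3
        · rw [if_neg (by omega)]
          by_cases c2 : 2 ≤ u.length
          · rw [if_pos (by omega)]; exact pvEntry_last_ne u c hc 2 0 c2
          · rw [if_neg (by omega)]

theorem pvMain : ∀ (n : Nat) (cs : List Char), cs.length ≤ n → (¬ ∀ c ∈ cs, c = '0') →
    pvLoopA cs = pvScan cs pvTable := by
  intro n
  induction n with
  | zero =>
    intro cs hlen h
    have hnil : cs = [] := List.length_eq_zero_iff.mp (Nat.le_zero.mp hlen)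
    subst hnil
    simp at h
  | succ n ih =>
    intro cs hlen h
    rw [pvLoopA.eq_def]
    by_cases e2 : cs.length = 2
    · rw [if_pos e2]
      simp only [pvScan, pvTable]
      rw [if_neg (by omega), if_neg (by omega), if_neg (by omega), if_neg (by omega),
        if_pos (by omega), if_pos (by rw [← e2]; simp)]
      simp
    rw [if_neg e2]
    by_cases e3 : cs.length = 3
    · rw [if_pos e3]
      simp only [pvScan, pvTable]
      rw [if_neg (by omega), if_neg (by omega), if_neg (by omega),
        if_pos (by omega), if_pos (by rw [← e3]; simp)]
      simp [PySem.List.slice_to]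
    rw [if_neg e3]
    by_cases e5 : cs.length = 5
    · rw [if_pos e5]
      simp only [pvScan, pvTable]
      rw [if_neg (by omega), if_neg (by omega),
        if_pos (by omega), if_pos (by rw [← e5]; simp)]
      simp [PySem.List.slice_to]
    rw [if_neg e5]
    by_cases e9 : cs.length = 9
    · rw [if_pos e9]
      simp only [pvScan, pvTable]
      rw [if_neg (by omega),
        if_pos (by omega), if_pos (by rw [← e9]; simp)]
      simp [PySem.List.slice_to]
    rw [if_neg e9]
    by_cases e12 : cs.length = 12
    · rw [if_pos e12]
      simp only [pvScan, pvTable]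
      rw [if_pos (by omega), if_pos (by rw [← e12]; simp)]
      simp [PySem.List.slice_to]
    rw [if_neg e12]
    -- non-special length: split off the last character
    rcases List.eq_nil_or_concat cs with hnil | ⟨u, c, rfl⟩
    · exact absurd (by simp [hnil]) h
    simp only [List.concat_eq_append] at hlen h e2 e3 e5 e9 e12 ⊢
    have hlenu : (u ++ [c]).length = u.length + 1 := by simp
    have hsp : u.length + 1 ≠ 2 ∧ u.length + 1 ≠ 3 ∧ u.length + 1 ≠ 5 ∧ u.length + 1 ≠ 9 ∧ u.length + 1 ≠ 12 := by
      rw [hlenu] at e2 e3 e5 e9 e12; exact ⟨e2, e3, e5, e9, e12⟩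
    split
    · rename_i c1 hg
      rw [List.concat_eq_append, PySem.List.pyGet?_neg_one_append_singleton] at hg
      obtain rfl : c = c1 := (Option.some.injEq _ _).mp hg
      by_cases hc : c = '0'
      · subst hc
        rw [if_pos rfl, PySem.List.slice_to_neg_one, List.dropLast_concat]
        have hu : ¬ ∀ c ∈ u, c = '0' := by
          intro hall
          refine h ?_
          intro x hx
          rcases List.mem_append.mp hx with hx | hx
          · exact hall x hx
          · simpa using hx
        rw [ih u (by rw [hlenu] at hlen; omega) hu]
        exact (pvScan_dropLast u hsp).symm
      · rw [if_neg hc]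
        exact (pvScan_last_ne u c hc hsp).symm
    · rename_i hg
      rw [List.concat_eq_append, PySem.List.pyGet?_neg_one_append_singleton] at hg
      exact absurd hg (by simp)

-- ===== VERDICT (by name: the statement is the Claim_ definition above) =====
theorem get_higher_ars_spec : Claim_equal_get_higher_ars := by
  intro ars _
  unfold Spec_get_higher_ars get_higher_ars get_higher_ars_alt
  by_cases h : ∀ c ∈ ars.toList, c = '0'
  · rw [if_pos ((pvRstrip0_eq_nil_iff _).mpr h), if_pos (by simpa using h)]
  · rw [if_neg (fun hh => h ((pvRstrip0_eq_nil_iff _).mp hh)),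
      if_neg (by simpa using h)]
    exact pvMain ars.toList.length ars.toList (le_refl _) h
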